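-- pv_equiv track=rewrite | github.com/AJL27/Doosan-Robot-Pick-and-Place-3D | CoordinateSoorting.py | layeringRows
-- ===== SOURCE A (Python) =====
-- def layeringRows(arr, column):
--     layeredArr = []
--     prevRow = arr[0]
--     layer = 0
--     rows = 0
--     layers = [0]
--     for row in arr:
--         if row[column] == prevRow[column]:
--             row_with_layer = list(row) + [layer]
--             rows += 1
--         else:
--             layer += 1
--             layers.append(rows)
--             rows += 1
--             row_with_layer = list(row) + [layer]
--         layeredArr.append(row_with_layer)
--         prevRow = row
--     layers.append(rows)
--     return layeredArr, layers
-- ===== SOURCE B (Python) =====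
-- def layeringRows(arr, column):
--     n = len(arr)
--     cuts = [i for i in range(1, n) if arr[i][column] != arr[i - 1][column]]
--     layers = [0] + cuts + [n]
--     layeredArr = [list(arr[i]) + [len([c for c in cuts if c <= i])] for i in range(n)]
--     return layeredArr, layers
-- ===== Notes on version B (the rewrite author's own statement) =====
-- stated objective: simpler
-- what changed: Replaces A's stateful single pass (prevRow/layer/rows accumulators mutated in one loop) by a declarative two-phase computation: first the list of cut positions where the column value changes, then layers and the per-row layer labels are derived from those cuts by comprehensions.
import Mathlib
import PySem

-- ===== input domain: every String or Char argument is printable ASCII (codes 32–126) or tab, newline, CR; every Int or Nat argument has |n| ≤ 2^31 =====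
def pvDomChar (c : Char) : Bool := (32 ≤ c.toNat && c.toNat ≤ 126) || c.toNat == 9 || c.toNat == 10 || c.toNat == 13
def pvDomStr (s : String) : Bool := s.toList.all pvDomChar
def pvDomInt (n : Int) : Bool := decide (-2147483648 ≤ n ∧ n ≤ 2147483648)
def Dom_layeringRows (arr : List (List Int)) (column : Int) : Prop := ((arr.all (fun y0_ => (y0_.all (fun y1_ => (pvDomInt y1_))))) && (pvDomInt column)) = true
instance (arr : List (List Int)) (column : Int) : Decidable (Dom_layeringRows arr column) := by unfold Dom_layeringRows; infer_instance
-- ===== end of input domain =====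

-- B replaces A's stateful single pass by a declarative two-phase computation (cut positions, then per-row counting); return-value equivalence on nonempty arr with a valid column index.

-- ===== PORT A =====
-- loop body of A: state = (layeredArr, prevRow, layer, rows, layers)
def layeringStep (column : Int)
    (st : List (List Int) × List Int × Int × Int × List Int) (row : List Int) :
    List (List Int) × List Int × Int × Int × List Int :=
  let (layeredArr, prevRow, layer, rows, layers) := st
  if PySem.List.pyGetD row column 0 = PySem.List.pyGetD prevRow column 0 then
    (layeredArr ++ [row ++ [layer]], row, layer, rows + 1, layers)
  else
    (layeredArr ++ [row ++ [layer + 1]], row, layer + 1, rows + 1, layers ++ [rows])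

def layeringRows (arr : List (List Int)) (column : Int) : List (List Int) × List Int :=
  match arr with
  | [] => ([], [])  -- unreachable under Pre_: Python raises IndexError at arr[0]
  | a0 :: _ =>
    let st := arr.foldl (layeringStep column) ([], a0, 0, 0, [0])
    (st.1, st.2.2.2.2 ++ [st.2.2.2.1])

-- ===== PORT B =====
def layeringRows_alt (arr : List (List Int)) (column : Int) : List (List Int) × List Int :=
  let n : Int := arr.length
  let cuts : List Int := (PySem.List.pyRange 1 n 1).filter (fun i =>
    PySem.List.pyGetD (PySem.List.pyGetD arr i []) column 0 ≠
    PySem.List.pyGetD (PySem.List.pyGetD arr (i - 1) []) column 0)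
  let layers : List Int := 0 :: cuts ++ [n]
  let layeredArr : List (List Int) := (PySem.List.pyRange 0 n 1).map (fun i =>
    PySem.List.pyGetD arr i [] ++ [((cuts.filter (fun c => c ≤ i)).length : Int)])
  (layeredArr, layers)

-- ===== PRECONDITION & SPEC =====
-- Pre_ = exactly where Python A returns: arr nonempty (else arr[0] raises IndexError)
-- and column a valid (possibly negative) index into every row (else row[column] raises).
def Pre_layeringRows (arr : List (List Int)) (column : Int) : Prop :=
  arr ≠ [] ∧ ∀ row ∈ arr, PySem.Raise.InRange row.length column
instance (arr : List (List Int)) (column : Int) : Decidable (Pre_layeringRows arr column) := by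
  unfold Pre_layeringRows; infer_instance
def pvWitness_layeringRows : List (List Int) × Int := ([[1, 2], [1, 3], [4, 5]], 0)

def Spec_layeringRows (arr : List (List Int)) (column : Int) (out : List (List Int) × List Int) : Prop := out = layeringRows_alt arr column
instance (arr : List (List Int)) (column : Int) (out : List (List Int) × List Int) : Decidable (Spec_layeringRows arr column out) := by unfold Spec_layeringRows; infer_instance

-- ===== CLAIM (what is proved, stated in full; the proofs are below) =====
def Claim_equal_layeringRows : Prop := ∀ (arr : List (List Int)) (column : Int), Dom_layeringRows arr column → Pre_layeringRows arr column → Spec_layeringRows arr column (layeringRows arr column)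
-- ===== LEMMAS AND PROOFS =====

-- proof helpers: closed forms shared by both ports
def colv (c : Int) (row : List Int) : Int := PySem.List.pyGetD row c 0
def cutsAux (c : Int) (prev : List Int) (l : List (List Int)) (idx : Int) : List Int :=
  match l with
  | [] => []
  | r :: rs => (if colv c r = colv c prev then [] else [idx]) ++ cutsAux c r rs (idx + 1)
def cnt (c : Int) (prev : List Int) (l : List (List Int)) : Int :=
  match l with
  | [] => 0
  | r :: rs => (if colv c r = colv c prev then 0 else 1) + cnt c r rs
def layAux (c : Int) (prev : List Int) (layer : Int) (l : List (List Int)) : List (List Int) :=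
  match l with
  | [] => []
  | r :: rs =>
    let l' := if colv c r = colv c prev then layer else layer + 1
    (r ++ [l']) :: layAux c r l' rs

theorem cutsAux_length (c : Int) : ∀ (l : List (List Int)) (prev : List Int) (idx : Int),
    ((cutsAux c prev l idx).length : Int) = cnt c prev l := by
  intro l
  induction l with
  | nil => intro prev idx; simp [cutsAux, cnt]
  | cons r rs ih =>
    intro prev idx
    by_cases h : colv c r = colv c prev <;>
      simp [cutsAux, cnt, h, ih r (idx + 1)] <;> omega

theorem cutsAux_append (c : Int) : ∀ (l : List (List Int)) (prev x : List Int) (idx : Int),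
    cutsAux c prev (l ++ [x]) idx =
      cutsAux c prev l idx ++
        (if colv c x = colv c (l.getLastD prev) then [] else [idx + l.length]) := by
  intro l
  induction l with
  | nil => intro prev x idx; simp [cutsAux]
  | cons r rs ih =>
    intro prev x idx
    simp only [List.cons_append, cutsAux, ih r x (idx + 1), List.getLastD_cons]
    have : idx + 1 + (rs.length : Int) = idx + ((r :: rs).length : Int) := by
      simp; omega
    rw [this, List.append_assoc]

theorem layAux_append (c : Int) : ∀ (l : List (List Int)) (prev x : List Int) (layer : Int),
    layAux c prev layer (l ++ [x]) =
      layAux c prev layer l ++ [x ++ [layer + cnt c prev (l ++ [x])]] := by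
  intro l
  induction l with
  | nil =>
    intro prev x layer
    by_cases h : colv c x = colv c prev <;> simp [layAux, cnt, h]
  | cons r rs ih =>
    intro prev x layer
    by_cases h : colv c r = colv c prev <;>
      simp [layAux, cnt, h, ih r x] <;> ring_nf

theorem cutsAux_bounds (c : Int) : ∀ (l : List (List Int)) (prev : List Int) (idx e : Int),
    e ∈ cutsAux c prev l idx → idx ≤ e ∧ e < idx + l.length := by
  intro l
  induction l with
  | nil => intro prev idx e h; simp [cutsAux] at h
  | cons r rs ih =>
    intro prev idx e h
    simp only [cutsAux, List.mem_append] at h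
    rcases h with h | h
    · split at h
      · simp at h
      · simp at h
        subst h
        refine ⟨le_refl _, ?_⟩
        simp
    · have := ih r (idx + 1) e h
      simp at *; omega

theorem foldA (c : Int) : ∀ (l : List (List Int)) (acc : List (List Int)) (prev : List Int)
    (layer rows : Int) (layers : List Int),
    l.foldl (layeringStep c) (acc, prev, layer, rows, layers) =
      (acc ++ layAux c prev layer l, l.getLastD prev, layer + cnt c prev l,
       rows + l.length, layers ++ cutsAux c prev l rows) := by
  intro l
  induction l with
  | nil => intro acc prev layer rows layers; simp [layAux, cnt, cutsAux]
  | cons r rs ih =>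
    intro acc prev layer rows layers
    by_cases h : colv c r = colv c prev
    · simp only [List.foldl_cons, layeringStep, colv] at *
      rw [if_pos h]
      rw [ih]
      simp [layAux, cnt, cutsAux, colv, h]
      refine ⟨?_, by omega⟩
      rw [List.getLast?_cons]
      cases rs <;> simp
    · simp only [List.foldl_cons, layeringStep, colv] at *
      rw [if_neg h]
      rw [ih]
      simp [layAux, cnt, cutsAux, colv, h]
      refine ⟨?_, by omega, by omega⟩
      rw [List.getLast?_cons]
      cases rs <;> simp

theorem pyGetD_app_left {α : Type} (as : List α) (x : α) (i : Int) (d : α)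
    (h0 : 0 ≤ i) (h1 : i < as.length) :
    PySem.List.pyGetD (as ++ [x]) i d = PySem.List.pyGetD as i d := by
  rw [PySem.List.pyGetD_eq_getElem (as ++ [x]) d h0 (by simp; omega),
      PySem.List.pyGetD_eq_getElem as d h0 (by simpa using h1)]
  rw [List.getElem_append_left]

theorem pyGetD_app_len {α : Type} (as : List α) (x : α) (d : α) :
    PySem.List.pyGetD (as ++ [x]) (as.length : Int) d = x := by
  rw [PySem.List.pyGetD_eq_getElem (as ++ [x]) d (by positivity) (by simp)]
  simp

theorem cutsB (c : Int) : ∀ (ys : List (List Int)) (a0 : List Int),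
    (PySem.List.pyRange 1 (((a0 :: ys).length : Int)) 1).filter (fun i =>
      PySem.List.pyGetD (PySem.List.pyGetD (a0 :: ys) i []) c 0 ≠
      PySem.List.pyGetD (PySem.List.pyGetD (a0 :: ys) (i - 1) []) c 0)
    = cutsAux c a0 (a0 :: ys) 0 := by
  intro ys
  induction ys using List.reverseRecOn with
  | nil =>
    intro a0
    simp [PySem.List.pyRange_one_eq_nil, cutsAux, colv]
  | append_singleton ys x ih =>
    intro a0
    rw [show a0 :: (ys ++ [x]) = (a0 :: ys) ++ [x] from by simp]
    rw [show ((((a0 :: ys) ++ [x]).length : Int)) = ((a0 :: ys).length : Int) + 1 from by simp]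
    rw [PySem.List.pyRange_one_succ_right (by simp), List.filter_append]
    have hcong : ∀ i ∈ PySem.List.pyRange 1 ((a0 :: ys).length : Int) 1,
        (decide ¬(PySem.List.pyGetD (PySem.List.pyGetD ((a0 :: ys) ++ [x]) i []) c 0 =
          PySem.List.pyGetD (PySem.List.pyGetD ((a0 :: ys) ++ [x]) (i - 1) []) c 0)) =
        (decide ¬(PySem.List.pyGetD (PySem.List.pyGetD (a0 :: ys) i []) c 0 =
          PySem.List.pyGetD (PySem.List.pyGetD (a0 :: ys) (i - 1) []) c 0)) := by
      intro i hi
      rw [PySem.List.mem_pyRange_one] at hi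
      rw [pyGetD_app_left _ _ _ _ (by omega) (by omega),
          pyGetD_app_left _ _ _ _ (by omega) (by omega)]
    rw [List.filter_congr hcong, ih a0, cutsAux_append]
    congr 1
    have hx : PySem.List.pyGetD ((a0 :: ys) ++ [x]) ((a0 :: ys).length : Int) [] = x := by
      exact pyGetD_app_len _ _ _
    have hlast : PySem.List.pyGetD ((a0 :: ys) ++ [x]) (((a0 :: ys).length : Int) - 1) [] =
        (a0 :: ys).getLastD a0 := by
      rw [pyGetD_app_left _ _ _ _ (by simp) (by simp)]
      rw [PySem.List.pyGetD_eq_getElem (a0 :: ys) [] (by simp) (by simp)]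
      have : (a0 :: ys).getLastD a0 = (a0 :: ys).getLast (by simp) := by
        cases ys <;> simp [List.getLastD]
      rw [this, List.getLast_eq_getElem]
      congr 1
      simp
    simp only [List.filter, hx, hlast]
    have e : (a0 :: ys).getLastD a0 = (a0 :: ys).getLast (by simp) := by
      cases ys <;> simp [List.getLastD]
    by_cases h : PySem.List.pyGetD x c 0 = PySem.List.pyGetD ((a0 :: ys).getLastD a0) c 0
    all_goals rw [e] at h; simp [colv, h, List.getLastD]

theorem layB (c : Int) : ∀ (ys : List (List Int)) (a0 : List Int),
    (PySem.List.pyRange 0 ((a0 :: ys).length : Int) 1).map (fun i =>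
      PySem.List.pyGetD (a0 :: ys) i [] ++
        [(((cutsAux c a0 (a0 :: ys) 0).filter (fun cv => cv ≤ i)).length : Int)])
    = layAux c a0 0 (a0 :: ys) := by
  intro ys
  induction ys using List.reverseRecOn with
  | nil =>
    intro a0
    rw [show (([a0] : List (List Int)).length : Int) = 0 + 1 from by simp,
        PySem.List.pyRange_one_singleton]
    simp [cutsAux, layAux, colv]
  | append_singleton ys x ih =>
    intro a0
    rw [show a0 :: (ys ++ [x]) = (a0 :: ys) ++ [x] from by simp]
    rw [show ((((a0 :: ys) ++ [x]).length : Int)) = ((a0 :: ys).length : Int) + 1 from by simp]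
    rw [PySem.List.pyRange_one_succ_right (by positivity), List.map_append]
    rw [cutsAux_append]
    set t : List Int := (if colv c x = colv c ((a0 :: ys).getLastD a0) then ([] : List Int)
      else [(0 : Int) + ((a0 :: ys).length : Int)]) with ht
    have hmap : ∀ i ∈ PySem.List.pyRange 0 ((a0 :: ys).length : Int) 1,
        PySem.List.pyGetD ((a0 :: ys) ++ [x]) i [] ++
          [((((cutsAux c a0 (a0 :: ys) 0 ++ t).filter (fun cv => cv ≤ i)).length : Int))]
        = PySem.List.pyGetD (a0 :: ys) i [] ++
          [(((cutsAux c a0 (a0 :: ys) 0).filter (fun cv => cv ≤ i)).length : Int)] := by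
      intro i hi
      rw [PySem.List.mem_pyRange_one] at hi
      rw [pyGetD_app_left _ _ _ _ (by omega) (by omega), List.filter_append]
      have htail : t.filter (fun cv => cv ≤ i) = [] := by
        rw [ht]
        split
        · simp
        · simp at hi ⊢
          omega
      rw [htail, List.append_nil]
    rw [List.map_congr_left hmap, ih a0]
    have hfull : (cutsAux c a0 (a0 :: ys) 0 ++ t).filter
        (fun cv => cv ≤ ((a0 :: ys).length : Int)) = cutsAux c a0 ((a0 :: ys) ++ [x]) 0 := by
      rw [ht, ← cutsAux_append]
      apply List.filter_eq_self.mpr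
      intro e he
      have := cutsAux_bounds c ((a0 :: ys) ++ [x]) a0 0 e he
      simp at this ⊢
      omega
    have hlastmap : PySem.List.pyGetD ((a0 :: ys) ++ [x]) ((a0 :: ys).length : Int) [] ++
        [((((cutsAux c a0 (a0 :: ys) 0 ++ t).filter
            (fun cv => cv ≤ ((a0 :: ys).length : Int))).length : Int))]
        = x ++ [0 + cnt c a0 ((a0 :: ys) ++ [x])] := by
      rw [pyGetD_app_len, hfull, cutsAux_length]
      simp
    simp only [List.map_cons, List.map_nil]
    rw [hlastmap, layAux_append]

-- ===== VERDICT (by name: the statement is the Claim_ definition above) =====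
theorem layeringRows_spec : Claim_equal_layeringRows := by
  intro arr column _ hpre
  unfold Spec_layeringRows
  obtain ⟨hne, -⟩ := hpre
  cases arr with
  | nil => exact absurd rfl hne
  | cons a0 rest =>
    have hA : layeringRows (a0 :: rest) column =
        (layAux column a0 0 (a0 :: rest),
         ([0] ++ cutsAux column a0 (a0 :: rest) 0) ++ [0 + ((a0 :: rest).length : Int)]) := by
      simp only [layeringRows]
      rw [foldA]
      simp
    have hB : layeringRows_alt (a0 :: rest) column =
        (layAux column a0 0 (a0 :: rest),
         0 :: (cutsAux column a0 (a0 :: rest) 0 ++ [((a0 :: rest).length : Int)])) := by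
      simp only [layeringRows_alt]
      rw [cutsB column rest a0, layB column rest a0]
      simp
    rw [hA, hB]
    simp
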